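-- pv_equiv track=rewrite | github.com/NCHIRANJEEVI799/hacktoberfest2020 | 5.py | sec_max_finder
-- ===== SOURCE A (Python) =====
-- def sec_max_finder(n,arr):
--     zes = max(arr)
--     i=0
--     while(i<n):
--         if zes ==max(arr):
--             arr.remove(max(arr))
--         i+=1
--     return max(arr)
-- ===== SOURCE B (Python) =====
-- def sec_max_finder(n, arr):
--     m = max(arr)
--     c = arr.count(m)
--     if n < c:
--         return m
--     return max(x for x in arr if x < m)
-- ===== Notes on version B (the rewrite author's own statement) =====
-- stated objective: faster
-- what changed: Replaced the n-iteration remove-the-max loop (each step rescanning the list with max() and remove()) by a single computation of the maximum, its multiplicity, and the maximum of the strictly smaller elements, branching on n < count.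
import Mathlib
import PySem

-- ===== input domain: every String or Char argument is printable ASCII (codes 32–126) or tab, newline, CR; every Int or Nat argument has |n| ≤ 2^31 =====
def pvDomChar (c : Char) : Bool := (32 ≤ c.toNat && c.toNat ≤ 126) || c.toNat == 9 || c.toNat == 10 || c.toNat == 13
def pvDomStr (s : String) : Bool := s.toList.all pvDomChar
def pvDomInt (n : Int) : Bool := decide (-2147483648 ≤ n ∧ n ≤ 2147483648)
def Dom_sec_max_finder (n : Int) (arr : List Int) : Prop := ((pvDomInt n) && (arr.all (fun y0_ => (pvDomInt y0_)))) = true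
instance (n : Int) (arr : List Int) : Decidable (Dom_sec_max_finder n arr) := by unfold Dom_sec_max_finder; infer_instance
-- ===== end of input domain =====

-- B replaces A's quadratic remove-the-max loop by one O(n) pass computing max, its count
-- and the max of the smaller elements; A mutates arr in place (B does not) — the claim is
-- about the return value only.


-- ===== PORT A =====
-- max(xs); the 0 default is the ValueError case (empty list), excluded by Pre_
def pyMaxI (xs : List Int) : Int := (PySem.List.max? xs (fun x => x)).getD 0

-- the while-loop of A: i runs from 0 to n-1, so n.toNat iterations over the mutated arr
def secLoopA (zes : Int) : Nat → List Int → List Int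
  | 0, arr => arr
  | f + 1, arr =>
      if zes = pyMaxI arr then
        secLoopA zes f ((PySem.List.remove? arr (pyMaxI arr)).getD arr)
      else
        secLoopA zes f arr

def sec_max_finder (n : Int) (arr : List Int) : Int :=
  let zes := pyMaxI arr
  pyMaxI (secLoopA zes n.toNat arr)

-- ===== PORT B =====
def sec_max_finder_alt (n : Int) (arr : List Int) : Int :=
  let m := pyMaxI arr
  let c : Int := (PySem.List.count arr m : Int)
  if n < c then m
  else pyMaxI (arr.filter (fun x => decide (x < m)))

-- ===== PRECONDITION & SPEC =====
-- Pre_ excludes exactly the inputs where Python A raises ValueError (max of empty sequence):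
-- the empty list, and lists whose elements all equal the maximum when n ≥ len(arr).
def Pre_sec_max_finder (n : Int) (arr : List Int) : Prop :=
  arr ≠ [] ∧
    (arr.count ((PySem.List.max? arr (fun x => x)).getD 0) < arr.length ∨ n < (arr.length : Int))
instance (n : Int) (arr : List Int) : Decidable (Pre_sec_max_finder n arr) := by
  unfold Pre_sec_max_finder; infer_instance

def pvWitness_sec_max_finder : Int × List Int := (2, [3, 1, 3, 2])

def Spec_sec_max_finder (n : Int) (arr : List Int) (out : Int) : Prop := out = sec_max_finder_alt n arr
instance (n : Int) (arr : List Int) (out : Int) : Decidable (Spec_sec_max_finder n arr out) := by unfold Spec_sec_max_finder; infer_instance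

-- ===== CLAIM (what is proved, stated in full; the proofs are below) =====
def Claim_equal_sec_max_finder : Prop := ∀ (n : Int) (arr : List Int), Dom_sec_max_finder n arr → Pre_sec_max_finder n arr → Spec_sec_max_finder n arr (sec_max_finder n arr)

-- ===== LEMMAS AND PROOFS =====

-- max? with the identity key returns exactly the upper bound that is a member
theorem pyMax_id_eq {m : Int} (arr : List Int) (h1 : m ∈ arr) (h2 : ∀ x ∈ arr, x ≤ m) :
    PySem.List.max? arr (fun x => x) = some m := by
  cases h : PySem.List.max? arr (fun x => x) with
  | none =>
      rw [PySem.List.max?_eq_none_iff] at h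
      subst h; cases h1
  | some M =>
      have hmem := PySem.List.max?_mem h
      have hmax := PySem.List.max?_isMax h m h1
      have hMm : M = m := le_antisymm (h2 M hmem) hmax
      rw [hMm]

theorem secLoopA_nil (m : Int) (f : Nat) : secLoopA m f [] = [] := by
  induction f with
  | zero => rfl
  | succ f ih =>
      simp only [secLoopA]
      split <;> simp [PySem.List.remove?, ih]

theorem filter_erase_lt (m : Int) (arr : List Int) :
    (arr.erase m).filter (fun x => decide (x < m)) = arr.filter (fun x => decide (x < m)) := by
  induction arr with
  | nil => rfl
  | cons a t ih =>
      by_cases h : a = m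
      · subst h; simp
      · simp only [List.erase_cons, beq_iff_eq, if_neg h, List.filter_cons, ih]

theorem secLoopA_max (m : Int) (f : Nat) : ∀ (arr : List Int), (∀ x ∈ arr, x ≤ m) →
    PySem.List.max? (secLoopA m f arr) (fun x => x) =
      if f < arr.count m then some m
      else PySem.List.max? (arr.filter (fun x => decide (x < m))) (fun x => x) := by
  induction f with
  | zero =>
      intro arr h2
      by_cases hc : 0 < arr.count m
      · rw [if_pos hc]
        exact pyMax_id_eq arr (List.count_pos_iff.mp hc) h2
      · rw [if_neg hc]
        have hcount : arr.count m = 0 := by omega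
        have hfil : arr.filter (fun x => decide (x < m)) = arr := by
          apply List.filter_eq_self.mpr
          intro x hx
          have hne : x ≠ m := by
            intro he; subst he
            exact (List.count_eq_zero.mp hcount) hx
          simp [lt_iff_le_and_ne.mpr ⟨h2 x hx, hne⟩]
        rw [hfil]; rfl
  | succ f ih =>
      intro arr h2
      by_cases hmem : m ∈ arr
      · have hpm : pyMaxI arr = m := by rw [pyMaxI, pyMax_id_eq arr hmem h2]; rfl
        have hrem : PySem.List.remove? arr (pyMaxI arr) = some (arr.erase m) := by
          rw [hpm]; exact PySem.List.remove?_eq_some_erase arr m hmem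
        have hstep : secLoopA m (f + 1) arr = secLoopA m f (arr.erase m) := by
          rw [secLoopA, if_pos hpm.symm, hrem]
          rfl
        rw [hstep, ih (arr.erase m) (fun x hx => h2 x (List.mem_of_mem_erase hx)),
            filter_erase_lt, List.count_erase_self]
        have hpos : 0 < arr.count m := List.count_pos_iff.mpr hmem
        by_cases hf : f + 1 < arr.count m
        · rw [if_pos (by omega : f < arr.count m - 1), if_pos hf]
        · rw [if_neg (by omega : ¬ f < arr.count m - 1), if_neg hf]
      · by_cases hnil : arr = []
        · subst hnil
          rw [secLoopA_nil]
          simp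
        · have hnm : arr.count m = 0 := List.count_eq_zero.mpr hmem
          obtain ⟨M, hM⟩ : ∃ M, PySem.List.max? arr (fun x => x) = some M := by
            cases h : PySem.List.max? arr (fun x => x) with
            | none => exact absurd ((PySem.List.max?_eq_none_iff _ _).mp h) hnil
            | some M => exact ⟨M, rfl⟩
          have hpmM : pyMaxI arr = M := by rw [pyMaxI, hM]; rfl
          have hcond : ¬ m = pyMaxI arr := by
            intro he
            apply hmem
            rw [he, hpmM]
            exact PySem.List.max?_mem hM
          have hstep : secLoopA m (f + 1) arr = secLoopA m f arr := by
            rw [secLoopA, if_neg hcond]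
          rw [hstep, ih arr h2, hnm]
          rw [if_neg (by omega : ¬ f < 0), if_neg (by omega : ¬ f + 1 < 0)]

-- ===== VERDICT (by name: the statement is the Claim_ definition above) =====
theorem sec_max_finder_spec : Claim_equal_sec_max_finder := by
  intro n arr hDom hPre
  obtain ⟨hne, _⟩ := hPre
  obtain ⟨M, hM⟩ : ∃ M, PySem.List.max? arr (fun x => x) = some M := by
    cases h : PySem.List.max? arr (fun x => x) with
    | none => exact absurd ((PySem.List.max?_eq_none_iff _ _).mp h) hne
    | some M => exact ⟨M, rfl⟩
  have hpm : pyMaxI arr = M := by rw [pyMaxI, hM]; rfl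
  have hmem : pyMaxI arr ∈ arr := hpm ▸ PySem.List.max?_mem hM
  have hbd : ∀ x ∈ arr, x ≤ pyMaxI arr := by
    intro x hx; rw [hpm]; exact PySem.List.max?_isMax hM x hx
  have hcpos : 0 < arr.count (pyMaxI arr) := List.count_pos_iff.mpr hmem
  have hceq : (PySem.List.count arr (pyMaxI arr) : Int) = (arr.count (pyMaxI arr) : Int) := by
    rw [PySem.List.count_eq]
  unfold Spec_sec_max_finder sec_max_finder sec_max_finder_alt
  simp only [hceq]
  rw [pyMaxI, secLoopA_max (pyMaxI arr) n.toNat arr hbd]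
  by_cases hlt : n < (arr.count (pyMaxI arr) : Int)
  · rw [if_pos (by omega : n.toNat < arr.count (pyMaxI arr)), if_pos hlt]
    rfl
  · rw [if_neg (by omega : ¬ n.toNat < arr.count (pyMaxI arr)), if_neg hlt]
    rfl
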